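-- pv_equiv track=rewrite | github.com/alonsoaev4-a11y/ProyectoGraficacion | backend/app/routers/ai.py | get_history_window
-- ===== SOURCE A (Python) =====
-- HISTORY_MAX_MESSAGES = 16
--
-- HISTORY_MAX_CHARS = 18000
--
-- def get_history_window(
--     history: list[dict],
--     max_messages: int = HISTORY_MAX_MESSAGES,
--     max_chars: int = HISTORY_MAX_CHARS,
-- ) -> list[dict]:
--     """Trim conversation history by message count and cumulative size."""
--     window = history[-max_messages:]
--     while len(window) > 1 and sum(len(item.get("content", "")) for item in window) > max_chars:
--         window = window[1:]
--     return window
-- ===== SOURCE B (Python) =====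
-- HISTORY_MAX_MESSAGES = 16
--
-- HISTORY_MAX_CHARS = 18000
--
-- def get_history_window(
--     history: list[dict],
--     max_messages: int = HISTORY_MAX_MESSAGES,
--     max_chars: int = HISTORY_MAX_CHARS,
-- ) -> list[dict]:
--     """Trim conversation history by message count and cumulative size.
--
--     One pass: precompute content lengths, keep a running total, subtract
--     as items are dropped from the front, instead of re-summing each round.
--     """
--     window = history[-max_messages:]
--     lens = [len(item.get("content", "")) for item in window]
--     total = sum(lens)
--     i = 0
--     while len(window) - i > 1 and total > max_chars:
--         total -= lens[i]
--         i += 1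
--     return window[i:]
-- ===== Notes on version B (the rewrite author's own statement) =====
-- stated objective: alternative
-- what changed: Replaces the while-loop that re-sums every remaining item's content length on each drop with precomputed lengths and a running total decremented as the front index advances, returning one final suffix slice.
import Mathlib
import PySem

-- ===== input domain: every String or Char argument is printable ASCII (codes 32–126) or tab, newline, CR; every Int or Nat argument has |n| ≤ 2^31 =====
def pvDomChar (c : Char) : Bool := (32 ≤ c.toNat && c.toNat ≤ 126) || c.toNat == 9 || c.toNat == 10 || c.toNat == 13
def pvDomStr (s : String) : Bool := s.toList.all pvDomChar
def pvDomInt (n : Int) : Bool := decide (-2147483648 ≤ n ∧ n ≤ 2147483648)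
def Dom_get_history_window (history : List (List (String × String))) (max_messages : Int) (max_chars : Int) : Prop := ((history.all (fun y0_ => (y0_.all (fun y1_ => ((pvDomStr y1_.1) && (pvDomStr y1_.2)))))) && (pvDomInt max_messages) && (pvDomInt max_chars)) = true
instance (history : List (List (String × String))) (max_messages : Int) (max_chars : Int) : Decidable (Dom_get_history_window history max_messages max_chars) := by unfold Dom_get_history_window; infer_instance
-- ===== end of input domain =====

-- ===== PORT A =====
-- B changes A's re-summing drop loop into one pass with precomputed lengths and a running total.
-- port of: len(item.get("content", "")), item an association-list dict (first match)
def pvContentLen (item : List (String × String)) : Int :=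
  PySem.Str.len (((item.find? (fun p => p.1 == "content")).map Prod.snd).getD "")

-- port of: sum(len(item.get("content", "")) for item in window)
def pvSumA (w : List (List (String × String))) : Int :=
  (w.map pvContentLen).sum

-- port of A's while loop: while len(window) > 1 and sum(...) > max_chars: window = window[1:]
def pvLoopA (w : List (List (String × String))) (max_chars : Int) : List (List (String × String)) :=
  if _h : 1 < w.length ∧ max_chars < pvSumA w then
    pvLoopA (PySem.List.slice w (some 1) none) max_chars
  else w
termination_by w.length
decreasing_by
  simp only [PySem.List.slice_from_one, List.length_tail]
  omega

def get_history_window (history : List (List (String × String))) (max_messages : Int) (max_chars : Int) : List (List (String × String)) :=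
  pvLoopA (PySem.List.slice history (some (-max_messages)) none) max_chars

-- ===== PORT B =====
-- port of B's index loop: while len(window) - i > 1 and total > max_chars: total -= lens[i]; i += 1
-- (advancing i over window/lens is ported as structural recursion on the two lists; returns window[i:])
def pvLoopB (w : List (List (String × String))) (lens : List Int) (total max_chars : Int) : List (List (String × String)) :=
  if 1 < w.length ∧ max_chars < total then
    match w, lens with
    | _ :: w', l :: ls' => pvLoopB w' ls' (total - l) max_chars
    | w, _ => w
  else w

def get_history_window_alt (history : List (List (String × String))) (max_messages : Int) (max_chars : Int) : List (List (String × String)) :=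
  let window := PySem.List.slice history (some (-max_messages)) none
  let lens := window.map pvContentLen
  pvLoopB window lens lens.sum max_chars

-- ===== PRECONDITION & SPEC =====
def Spec_get_history_window (history : List (List (String × String))) (max_messages : Int) (max_chars : Int) (out : List (List (String × String))) : Prop := out = get_history_window_alt history max_messages max_chars
instance (history : List (List (String × String))) (max_messages : Int) (max_chars : Int) (out : List (List (String × String))) : Decidable (Spec_get_history_window history max_messages max_chars out) := by unfold Spec_get_history_window; infer_instance

-- ===== CLAIM (what is proved, stated in full; the proofs are below) =====
def Claim_equal_get_history_window : Prop := ∀ (history : List (List (String × String))) (max_messages : Int) (max_chars : Int), Dom_get_history_window history max_messages max_chars → Spec_get_history_window history max_messages max_chars (get_history_window history max_messages max_chars)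

-- ===== LEMMAS AND PROOFS =====
theorem pvLoopB_eq_pvLoopA (w : List (List (String × String))) (mc : Int) :
    pvLoopB w (w.map pvContentLen) ((w.map pvContentLen).sum) mc = pvLoopA w mc := by
  induction w with
  | nil => simp [pvLoopB, pvLoopA, pvSumA]
  | cons x w' ih =>
    simp only [List.map_cons, List.sum_cons]
    rw [pvLoopB, pvLoopA]
    have hsum : pvSumA (x :: w') = pvContentLen x + (w'.map pvContentLen).sum := by
      simp [pvSumA]
    by_cases h : 1 < (x :: w').length ∧ mc < pvContentLen x + (w'.map pvContentLen).sum
    · rw [if_pos h, dif_pos (by simpa [hsum] using h)]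
      rw [PySem.List.slice_from_one, List.tail_cons]
      simpa [add_sub_cancel_left] using ih
    · rw [if_neg h, dif_neg (by simpa [hsum] using h)]

-- ===== VERDICT (by name: the statement is the Claim_ definition above) =====
theorem get_history_window_spec : Claim_equal_get_history_window := by
  intro history max_messages max_chars _
  unfold Spec_get_history_window get_history_window get_history_window_alt
  exact (pvLoopB_eq_pvLoopA _ _).symm
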